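-- pv_equiv track=rewrite | github.com/wael159/python_training | level_1/dishes.py | getMaximumEatenDishCount_2
-- ===== SOURCE A (Python) =====
-- from typing import List
-- from typing import List
-- from collections import deque
--
-- def getMaximumEatenDishCount_2(N: int, D: List[int], K: int) -> int:
--   # Write your code her
--     last_k_eaten = deque()
--     seen = set()
--     count = 0
--
--     for dish in D:
--         if dish not in seen:
--             count += 1
--             last_k_eaten.append(dish)
--             seen.add(dish)
--             if len(last_k_eaten) > K:
--                 removed = last_k_eaten.popleft()
--                 seen.remove(removed)
--
--     return count
-- ===== SOURCE B (Python) =====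
-- def getMaximumEatenDishCount_2(N, D, K):
--     # last-seen table: dish -> running eat-count when it was last eaten
--     last_eaten = {}
--     eat_count = 0
--     for dish in D:
--         if dish not in last_eaten or eat_count - last_eaten[dish] >= K:
--             eat_count += 1
--             last_eaten[dish] = eat_count
--     return eat_count
-- ===== Notes on version B (the rewrite author's own statement) =====
-- stated objective: simpler
-- what changed: Replaces the deque window plus mirror set and its popleft/remove eviction branch by a single dict mapping each dish to the running eat-count at which it was last eaten, deciding edibility by age (eat_count - last_eaten[dish] >= K).
import Mathlib
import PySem

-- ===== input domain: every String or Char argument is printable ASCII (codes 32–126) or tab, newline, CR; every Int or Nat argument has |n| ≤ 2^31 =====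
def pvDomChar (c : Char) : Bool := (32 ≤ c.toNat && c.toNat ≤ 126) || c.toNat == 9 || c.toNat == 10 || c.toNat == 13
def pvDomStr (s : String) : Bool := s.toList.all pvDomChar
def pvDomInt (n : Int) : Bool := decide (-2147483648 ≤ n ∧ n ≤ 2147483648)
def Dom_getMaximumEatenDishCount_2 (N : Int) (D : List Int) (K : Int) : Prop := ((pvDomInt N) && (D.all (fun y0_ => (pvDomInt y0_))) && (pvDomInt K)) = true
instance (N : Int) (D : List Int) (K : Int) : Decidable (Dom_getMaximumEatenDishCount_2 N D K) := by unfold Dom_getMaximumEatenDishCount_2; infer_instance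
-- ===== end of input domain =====

-- B replaces A's deque-window + mirror set by a single last-eaten-count table (simpler: no eviction branch).

-- ===== PORT A =====
-- state: (last_k_eaten deque as a list, seen set, count)
def getMaximumEatenDishCount_2 (N : Int) (D : List Int) (K : Int) : Int :=
  (D.foldl (fun (st : List Int × PySem.Set Int × Int) dish =>
      let dq := st.1; let seen := st.2.1; let count := st.2.2
      if seen.contains dish then st
      else
        let count := count + 1
        let dq := dq ++ [dish]
        let seen := PySem.Set.add seen dish
        if (dq.length : Int) > K then
          match dq with
          | [] => (dq, seen, count)  -- unreachable: dq was just appended to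
          -- removed = popleft; it is always a member of seen, so set.remove = discard here
          | removed :: rest => (rest, PySem.Set.discard seen removed, count)
        else (dq, seen, count))
    ([], PySem.Set.empty, 0)).2.2

-- ===== PORT B =====
-- state: (last_eaten dict, eat_count)
def getMaximumEatenDishCount_2_alt (N : Int) (D : List Int) (K : Int) : Int :=
  (D.foldl (fun (st : PySem.Dict Int Int × Int) dish =>
      let m := st.1; let e := st.2
      match m.get? dish with
      | none => (m.insert dish (e + 1), e + 1)
      | some v => if e - v ≥ K then (m.insert dish (e + 1), e + 1) else st)
    (PySem.Dict.empty, 0)).2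

-- ===== PRECONDITION & SPEC =====
def Spec_getMaximumEatenDishCount_2 (N : Int) (D : List Int) (K : Int) (out : Int) : Prop := out = getMaximumEatenDishCount_2_alt N D K
instance (N : Int) (D : List Int) (K : Int) (out : Int) : Decidable (Spec_getMaximumEatenDishCount_2 N D K out) := by unfold Spec_getMaximumEatenDishCount_2; infer_instance

-- ===== CLAIM (what is proved, stated in full; the proofs are below) =====
def Claim_equal_getMaximumEatenDishCount_2 : Prop := ∀ (N : Int) (D : List Int) (K : Int), Dom_getMaximumEatenDishCount_2 N D K → Spec_getMaximumEatenDishCount_2 N D K (getMaximumEatenDishCount_2 N D K)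

-- ===== LEMMAS AND PROOFS =====


-- proof-side helpers: the two fold steps, named (definitionally the lambdas in the ports)
def pvStepA (K : Int) (st : List Int × PySem.Set Int × Int) (dish : Int) :
    List Int × PySem.Set Int × Int :=
  if PySem.Set.contains st.2.1 dish then st
  else
    let count := st.2.2 + 1
    let dq := st.1 ++ [dish]
    let seen := PySem.Set.add st.2.1 dish
    if (dq.length : Int) > K then
      match dq with
      | [] => (dq, seen, count)
      | removed :: rest => (rest, PySem.Set.discard seen removed, count)
    else (dq, seen, count)

def pvStepB (K : Int) (st : PySem.Dict Int Int × Int) (dish : Int) :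
    PySem.Dict Int Int × Int :=
  match st.1.get? dish with
  | none => (st.1.insert dish (st.2 + 1), st.2 + 1)
  | some v => if st.2 - v ≥ K then (st.1.insert dish (st.2 + 1), st.2 + 1) else st

lemma pvPortA_eq (N : Int) (D : List Int) (K : Int) :
    getMaximumEatenDishCount_2 N D K = (D.foldl (pvStepA K) ([], PySem.Set.empty, 0)).2.2 := rfl

lemma pvPortB_eq (N : Int) (D : List Int) (K : Int) :
    getMaximumEatenDishCount_2_alt N D K = (D.foldl (pvStepB K) (PySem.Dict.empty, 0)).2 := rfl

-- the coupling invariant between A's (deque, seen, count) and B's (last_eaten, eat_count)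
def pvInv (K : Int) (dq : List Int) (seen : PySem.Set Int) (c : Int)
    (m : PySem.Dict Int Int) (e : Int) : Prop :=
  c = e ∧ 0 ≤ e ∧
  (∀ d, d ∈ seen ↔ d ∈ dq) ∧
  dq.Nodup ∧
  ((dq.length : Int) = min e (max K 0)) ∧
  (∀ (i : Nat) (h : i < dq.length), m.get? dq[i] = some (e - dq.length + i + 1)) ∧
  (∀ d, d ∉ dq → ∀ v, m.get? d = some v → e - v ≥ K)

lemma pvStep_inv (K dish : Int) (dq : List Int) (seen : PySem.Set Int) (c : Int)
    (m : PySem.Dict Int Int) (e : Int) (h : pvInv K dq seen c m e) :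
    pvInv K (pvStepA K (dq, seen, c) dish).1 (pvStepA K (dq, seen, c) dish).2.1
      (pvStepA K (dq, seen, c) dish).2.2 (pvStepB K (m, e) dish).1 (pvStepB K (m, e) dish).2 := by
  obtain ⟨hce, he, hseen, hnd, hlen, hidx, hout⟩ := h
  subst hce
  by_cases hmem : dish ∈ dq
  · -- dish in the window: both steps leave the state unchanged
    have hcont : PySem.Set.contains seen dish = true :=
      (PySem.Set.contains_iff seen dish).2 ((hseen dish).2 hmem)
    obtain ⟨i, hi, hdi⟩ := List.mem_iff_getElem.1 hmem
    have hv := hidx i hi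
    rw [hdi] at hv
    have hi' : (i : Int) < (dq.length : Int) := by exact_mod_cast hi
    have hKpos : (dq.length : Int) ≤ max K 0 := by omega
    have hA : pvStepA K (dq, seen, c) dish = (dq, seen, c) := by
      simp [pvStepA, (hseen dish).2 hmem]
    have hB : pvStepB K (m, c) dish = (m, c) := by
      simp only [pvStepB, hv]
      rw [if_neg (by omega)]
    rw [hA, hB]
    exact ⟨rfl, he, hseen, hnd, hlen, hidx, hout⟩

  · -- dish not in the window: both eat
    have hns : dish ∉ seen := fun hc => hmem ((hseen dish).1 hc)
    have hB : pvStepB K (m, c) dish = (m.insert dish (c + 1), c + 1) := by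
      cases hget : m.get? dish with
      | none => simp [pvStepB, hget]
      | some v =>
        have hKv : K ≤ c - v := hout dish hmem v hget
        simp [pvStepB, hget, hKv]
    rw [hB]
    by_cases hpop : ((dq.length : Int) + 1 > K)
    · -- eviction branch
      cases dq with
      | nil =>
        have hA : pvStepA K ([], seen, c) dish
            = ([], PySem.Set.discard (PySem.Set.add seen dish) dish, c + 1) := by
          have hc1 : ((([] : List Int) ++ [dish]).length : Int) > K := by
            simp only [List.nil_append, List.length_cons, List.length_nil] at hpop ⊢
            push_cast at hpop ⊢
            omega
          simp only [pvStepA]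
          rw [if_neg (by simpa using hns), if_pos hc1]
          rfl
        rw [hA]
        dsimp only
        have hK0 : K ≤ 0 := by
          simp only [List.length_nil, Nat.cast_zero] at hpop; omega
        have hlen0 : ((([] : List Int)).length : Int) = min (c + 1) (max K 0) := by
          rw [max_eq_right hK0, min_eq_right (by omega : (0:ℤ) ≤ c + 1)]
          simp
        refine ⟨rfl, by omega, ?_, List.nodup_nil, hlen0, ?_, ?_⟩
        · intro d
          simp only [PySem.Set.mem_discard, PySem.Set.mem_add, hseen d]
          simp only [List.mem_nil_iff]
          tauto
        · intro i hi; simp at hi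
        · intro d _ v hv
          by_cases hdd : d = dish
          · subst hdd
            rw [PySem.Dict.get?_insert_self _ _ _] at hv
            have := Option.some.inj hv
            omega
          · rw [PySem.Dict.get?_insert_of_ne _ _ hdd] at hv
            have := hout d (by simp) v hv
            omega
      | cons r rest =>
        have hA : pvStepA K (r :: rest, seen, c) dish
            = (rest ++ [dish], PySem.Set.discard (PySem.Set.add seen dish) r, c + 1) := by
          have hc1 : (((r :: rest) ++ [dish]).length : Int) > K := by
            simp only [List.length_append, List.length_cons, List.length_nil] at hpop ⊢
            push_cast at hpop ⊢
            omega
          simp only [pvStepA]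
          rw [if_neg (by simpa using hns), if_pos hc1]
          rfl
        rw [hA]
        dsimp only
        have hdr : dish ≠ r := fun h' => hmem (h' ▸ List.mem_cons_self ..)
        have hdrest : dish ∉ rest := fun h' => hmem (List.mem_cons_of_mem _ h')
        have hrrest : r ∉ rest := (List.nodup_cons.1 hnd).1
        have hlen' : ((rest.length : Int) + 1) = min c (max K 0) := by
          simp only [List.length_cons] at hlen; push_cast at hlen; omega
        refine ⟨rfl, by omega, ?_, ?_, ?_, ?_, ?_⟩
        · intro d
          have h1 : d ∈ rest → d ≠ r := fun hm he' => hrrest (he' ▸ hm)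
          have h2 : d = dish → d ≠ r := fun he' => he' ▸ hdr
          simp only [PySem.Set.mem_discard, PySem.Set.mem_add, hseen d,
            List.mem_append, List.mem_singleton, List.mem_cons]
          tauto
        · simp only [List.nodup_append, List.nodup_cons, List.nodup_nil,
            List.not_mem_nil, not_false_iff, and_true, true_and]
          refine ⟨(List.nodup_cons.1 hnd).2, ?_⟩
          intro a ha b hb
          rw [List.mem_singleton] at hb
          subst hb
          exact fun hae => hdrest (hae ▸ ha)
        · simp only [List.length_append, List.length_cons, List.length_nil] at hpop ⊢
          push_cast at hpop ⊢
          omega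
        · intro i hi
          simp only [List.length_append, List.length_cons, List.length_nil] at hi ⊢
          by_cases hil : i < rest.length
          · have hget : (rest ++ [dish])[i]'(by simp; omega) = rest[i] :=
              List.getElem_append_left hil
            rw [hget]
            have hne : rest[i] ≠ dish := fun h' => hdrest (h' ▸ List.getElem_mem hil)
            rw [PySem.Dict.get?_insert_of_ne _ _ hne]
            have hv := hidx (i + 1) (by simpa using hil)
            simp only [List.getElem_cons_succ, List.length_cons] at hv
            rw [hv]
            congr 1
            push_cast
            ring
          · have hieq : i = rest.length := by omega
            subst hieq
            have hget : (rest ++ [dish])[rest.length]'(by simp) = dish := by simp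
            rw [hget, PySem.Dict.get?_insert_self _ _ _]
            congr 1
            push_cast
            ring
        · intro d hd v hv
          have hddish : d ≠ dish := fun h' => hd (h' ▸ (by simp))
          rw [PySem.Dict.get?_insert_of_ne _ _ hddish] at hv
          by_cases hdr2 : d = r
          · subst hdr2
            have hv0 := hidx 0 (by simp)
            simp only [List.getElem_cons_zero, List.length_cons] at hv0
            rw [hv0] at hv
            have hveq := Option.some.inj hv
            simp only [List.length_cons] at hpop
            push_cast at hpop hveq
            omega
          · have hdold : d ∉ r :: rest := by
              intro h'
              rcases List.mem_cons.1 h' with h'' | h''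
              · exact hdr2 h''
              · exact hd (by simp [h''])
            have := hout d hdold v hv
            omega
    · -- no eviction
      have hA : pvStepA K (dq, seen, c) dish
          = (dq ++ [dish], PySem.Set.add seen dish, c + 1) := by
        have hc1 : ¬ (((dq ++ [dish]).length : Int) > K) := by
          simp only [List.length_append, List.length_cons, List.length_nil]
          push_cast at hpop ⊢
          omega
        simp only [pvStepA]
        rw [if_neg (by simpa using hns), if_neg hc1]
      rw [hA]
      dsimp only
      refine ⟨rfl, by omega, ?_, ?_, ?_, ?_, ?_⟩
      · intro d
        simp only [PySem.Set.mem_add, hseen d, List.mem_append, List.mem_singleton]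
      · simp only [List.nodup_append, List.nodup_cons, List.nodup_nil,
          List.not_mem_nil, not_false_iff, and_true, true_and]
        refine ⟨hnd, ?_⟩
        intro a ha b hb
        rw [List.mem_singleton] at hb
        subst hb
        exact fun hae => hmem (hae ▸ ha)
      · simp only [List.length_append, List.length_cons, List.length_nil] at hpop ⊢
        push_cast at hpop hlen ⊢
        omega
      · intro i hi
        simp only [List.length_append, List.length_cons, List.length_nil] at hi ⊢
        by_cases hil : i < dq.length
        · have hget : (dq ++ [dish])[i]'(by simp; omega) = dq[i] :=
            List.getElem_append_left hil
          rw [hget]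
          have hne : dq[i] ≠ dish := fun h' => hmem (h' ▸ List.getElem_mem hil)
          rw [PySem.Dict.get?_insert_of_ne _ _ hne]
          rw [hidx i hil]
          congr 1
          push_cast
          ring
        · have hieq : i = dq.length := by omega
          subst hieq
          have hget : (dq ++ [dish])[dq.length]'(by simp) = dish := by simp
          rw [hget, PySem.Dict.get?_insert_self _ _ _]
          congr 1
          push_cast
          ring
      · intro d hd v hv
        have hddish : d ≠ dish := fun h' => hd (h' ▸ (by simp))
        rw [PySem.Dict.get?_insert_of_ne _ _ hddish] at hv
        have hdold : d ∉ dq := fun h' => hd (by simp [h'])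
        have := hout d hdold v hv
        omega

lemma pvFold (K : Int) (D : List Int) :
    ∀ dq seen c m e, pvInv K dq seen c m e →
      (D.foldl (pvStepA K) (dq, seen, c)).2.2 = (D.foldl (pvStepB K) (m, e)).2 := by
  induction D with
  | nil => intro dq seen c m e h; exact h.1
  | cons dish rest ih =>
    intro dq seen c m e h
    simpa using ih _ _ _ _ _ (pvStep_inv K dish dq seen c m e h)

-- ===== VERDICT (by name: the statement is the Claim_ definition above) =====
theorem getMaximumEatenDishCount_2_spec : Claim_equal_getMaximumEatenDishCount_2 := by
  intro N D K _
  unfold Spec_getMaximumEatenDishCount_2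
  rw [pvPortA_eq, pvPortB_eq]
  refine pvFold K D [] PySem.Set.empty 0 PySem.Dict.empty 0 ?_
  refine ⟨rfl, le_refl 0, ?_, List.nodup_nil, by simp, ?_, ?_⟩
  · intro d; simp [PySem.Set.empty]
  · intro i h; simp at h
  · intro d _ v hv; simp [PySem.Dict.get?_empty] at hv
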